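-- pv_equiv track=rewrite | github.com/otu165/Algorithm | python/BOJ_1802.py | solve
-- ===== SOURCE A (Python) =====
-- def solve(case):
--     if len(case) <= 1:
--         return True
--
--     flag = True
--     for i in range(len(case) // 2):
--         if case[i] == case[-1 - i]:
--             flag = False
--             break
--
--     if flag:
--         return solve(case[:len(case) // 2]) and solve(case[len(case) // 2 + 1:])
--     else:
--         return False
-- ===== SOURCE B (Python) =====
-- def solve(case):
--     # Explicit stack of index ranges over the original string instead of
--     # recursion with substring copies.
--     stack = [(0, len(case))]
--     while stack:
--         lo, hi = stack.pop()
--         m = hi - lo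
--         if m <= 1:
--             continue
--         h = m // 2
--         for i in range(h):
--             if case[lo + i] == case[hi - 1 - i]:
--                 return False
--         stack.append((lo, lo + h))
--         stack.append((lo + h + 1, hi))
--     return True
-- ===== Notes on version B (the rewrite author's own statement) =====
-- stated objective: alternative
-- what changed: Replaces the recursion that copies substrings at every level with an iterative explicit stack of (lo, hi) index ranges over the original string, comparing characters in place and never allocating slices.
import Mathlib
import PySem

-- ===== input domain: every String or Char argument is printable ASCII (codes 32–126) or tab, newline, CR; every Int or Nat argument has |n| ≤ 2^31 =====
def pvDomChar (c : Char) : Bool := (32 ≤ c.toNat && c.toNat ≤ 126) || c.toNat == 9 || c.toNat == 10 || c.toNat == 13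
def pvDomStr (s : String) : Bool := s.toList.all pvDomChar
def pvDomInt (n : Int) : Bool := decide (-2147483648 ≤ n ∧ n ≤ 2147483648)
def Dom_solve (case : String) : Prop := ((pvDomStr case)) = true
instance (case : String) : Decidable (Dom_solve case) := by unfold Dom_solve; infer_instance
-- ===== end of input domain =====

-- B replaces A's recursion-with-substring-copies by an iterative explicit stack of
-- (lo, hi) index ranges over the original string (alternative decomposition, same cost).

-- ===== PORT A =====
-- A's for-loop with break over range(len//2): recursion over the index list.
def solveScanA (cs : List Char) : List Int → Bool
  | [] => true
  | i :: rest =>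
    if PySem.List.pyGet? cs i == PySem.List.pyGet? cs (-1 - i) then false
    else solveScanA cs rest

-- A recursing on the character list, with a structural fuel bound (fuel ≥ length always
-- holds at the call sites, so the fuel-exhaustion branch is never taken); the slices
-- case[:n//2] / case[n//2+1:] are take/drop (nonnegative in-range bounds, where Python
-- slicing is exactly take/drop).
def solveAF : Nat → List Char → Bool
  | 0, _ => true
  | k + 1, cs =>
    if cs.length ≤ 1 then true
    else
      if solveScanA cs (PySem.List.pyRange 0 (cs.length / 2) 1) then
        solveAF k (cs.take (cs.length / 2)) && solveAF k (cs.drop (cs.length / 2 + 1))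
      else false

def solve (case : String) : Bool := solveAF case.toList.length case.toList

-- ===== PORT B =====
-- B's inner for-loop 'for i in range(h)': i is the current index, the second argument
-- counts the remaining iterations (structural); returns true iff an equal pair is found.
def solveScanB (cs : List Char) (lo hi : Nat) : Nat → Nat → Bool
  | _, 0 => false
  | i, k + 1 =>
    if cs[lo + i]? == cs[hi - 1 - i]? then true
    else solveScanB cs lo hi (i + 1) k

-- B's while-loop over the explicit stack (list head = top of stack), with a structural
-- fuel bound 2*(total range length)+(stack size), which strictly decreases each iteration.
def runBF (cs : List Char) : Nat → List (Nat × Nat) → Bool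
  | _, [] => true
  | 0, _ :: _ => true
  | k + 1, (lo, hi) :: rest =>
    let m := hi - lo
    if m ≤ 1 then runBF cs k rest
    else
      let h := m / 2
      if solveScanB cs lo hi 0 h then false
      else runBF cs k ((lo + h + 1, hi) :: (lo, lo + h) :: rest)

def solve_alt (case : String) : Bool :=
  runBF case.toList (2 * case.toList.length + 1) [(0, case.toList.length)]

-- ===== PRECONDITION & SPEC =====
def Spec_solve (case : String) (out : Bool) : Prop := out = solve_alt case
instance (case : String) (out : Bool) : Decidable (Spec_solve case out) := by unfold Spec_solve; infer_instance

-- ===== CLAIM (what is proved, stated in full; the proofs are below) =====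
def Claim_equal_solve : Prop := ∀ (case : String), Dom_solve case → Spec_solve case (solve case)

-- ===== LEMMAS AND PROOFS =====

-- canonical A-side function: solveAF with exactly enough fuel
def solveA1 (l : List Char) : Bool := solveAF l.length l

lemma solveAF_fuel : ∀ (k : Nat) (l : List Char) (k' : Nat),
    l.length ≤ k → l.length ≤ k' → solveAF k l = solveAF k' l := by
  intro k
  induction k with
  | zero =>
    intro l k' hk _
    have : l = [] := List.eq_nil_of_length_eq_zero (by omega)
    subst this
    cases k' <;> simp [solveAF]
  | succ k ih =>
    intro l k' hk hk'
    match k' with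
    | 0 =>
      have : l = [] := List.eq_nil_of_length_eq_zero (by omega)
      subst this
      simp [solveAF]
    | k'' + 1 =>
      rw [solveAF, solveAF]
      by_cases h1 : l.length ≤ 1
      · simp [h1]
      · have ht : (l.take (l.length / 2)).length ≤ k := by
          simp [List.length_take]; omega
        have ht' : (l.take (l.length / 2)).length ≤ k'' := by
          simp [List.length_take]; omega
        have hd : (l.drop (l.length / 2 + 1)).length ≤ k := by
          simp; omega
        have hd' : (l.drop (l.length / 2 + 1)).length ≤ k'' := by
          simp; omega
        rw [ih _ _ ht ht', ih _ _ hd hd']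

lemma solveA1_short (l : List Char) (h : l.length ≤ 1) : solveA1 l = true := by
  unfold solveA1
  match hk : l.length with
  | 0 => rw [solveAF]
  | 1 => rw [solveAF, if_pos (by omega)]
  | n + 2 => omega

lemma solveA1_long (l : List Char) (h2 : 2 ≤ l.length) :
    solveA1 l =
      if solveScanA l (PySem.List.pyRange 0 (l.length / 2) 1) then
        solveA1 (l.take (l.length / 2)) && solveA1 (l.drop (l.length / 2 + 1))
      else false := by
  obtain ⟨k, hk⟩ : ∃ k, l.length = k + 1 := ⟨l.length - 1, by omega⟩
  unfold solveA1
  rw [hk, solveAF, if_neg (by omega)]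
  rw [solveAF_fuel k (l.take (l.length / 2)) (l.take (l.length / 2)).length
      (by simp [List.length_take]; omega) le_rfl]
  rw [solveAF_fuel k (l.drop (l.length / 2 + 1)) (l.drop (l.length / 2 + 1)).length
      (by simp; omega) le_rfl]
  rw [hk]

lemma scanA_eq_all (cs : List Char) (js : List Int) :
    solveScanA cs js = js.all
      (fun i => !(PySem.List.pyGet? cs i == PySem.List.pyGet? cs (-1 - i))) := by
  induction js with
  | nil => rfl
  | cons j rest ih =>
    rw [solveScanA, List.all_cons, ih]
    by_cases h : PySem.List.pyGet? cs j == PySem.List.pyGet? cs (-1 - j) <;> simp [h]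

lemma scanB_eq_exists (cs : List Char) (lo hi : Nat) : ∀ (k i : Nat),
    solveScanB cs lo hi i k =
      decide (∃ j < i + k, i ≤ j ∧ cs[lo + j]? = cs[hi - 1 - j]?) := by
  intro k
  induction k with
  | zero =>
    intro i
    symm
    simp only [solveScanB, decide_eq_false_iff_not]
    rintro ⟨j, hj, hij, _⟩; omega
  | succ k ih =>
    intro i
    rw [solveScanB]
    by_cases heq : cs[lo + i]? == cs[hi - 1 - i]?
    · rw [if_pos heq]
      simp only [beq_iff_eq] at heq
      exact (decide_eq_true ⟨i, by omega, le_refl i, heq⟩).symm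
    · rw [if_neg heq, ih]
      apply decide_eq_decide.mpr
      constructor
      · rintro ⟨j, hj, hij, he⟩; exact ⟨j, by omega, by omega, he⟩
      · rintro ⟨j, hj, hij, he⟩
        refine ⟨j, by omega, ?_, he⟩
        rcases Nat.eq_or_lt_of_le hij with rfl | hlt
        · exact absurd he (by simpa [beq_iff_eq] using heq)
        · omega

-- bridge: on the sublist sub = (cs.drop lo).take (hi-lo) the comparisons of A and B coincide
lemma scanA_eq_not_scanB (cs : List Char) (lo hi : Nat)
    (hhi : hi ≤ cs.length) (hm : 2 ≤ hi - lo) :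
    solveScanA ((cs.drop lo).take (hi - lo))
        (PySem.List.pyRange 0 (((hi - lo : Nat) : Int) / 2) 1)
      = !(solveScanB cs lo hi 0 ((hi - lo) / 2)) := by
  have hdiv : (((hi - lo : Nat) : Int) / 2) = (((hi - lo) / 2 : Nat) : Int) := by omega
  set m := hi - lo with hmeq
  set h := m / 2 with hheq
  set sub := (cs.drop lo).take m with hsub
  have hsl : sub.length = m := by
    simp [hsub, List.length_take]; omega
  have key : ∀ j : Nat, j < h →
      (PySem.List.pyGet? sub (j : Int) = PySem.List.pyGet? sub (-1 - (j : Int))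
        ↔ cs[lo + j]? = cs[hi - 1 - j]?) := by
    intro j hj
    have hjm : j < m := by omega
    have h1 : PySem.List.pyGet? sub (j : Int) = cs[lo + j]? := by
      rw [PySem.List.pyGet?_natCast, hsub, List.getElem?_take_of_lt hjm,
        List.getElem?_drop]
    have hcast : (-1 - (j : Int)) = -((j + 1 : Nat) : Int) := by push_cast; ring
    have h2 : PySem.List.pyGet? sub (-1 - (j : Int)) = cs[hi - 1 - j]? := by
      rw [hcast, PySem.List.pyGet?_neg_natCast _ _ (by omega) (by omega), hsl, hsub,
        List.getElem?_take_of_lt (by omega : m - (j + 1) < m), List.getElem?_drop]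
      congr 1
      omega
    rw [h1, h2]
  rw [scanA_eq_all, scanB_eq_exists, hdiv, PySem.List.pyRange_zero_natCast]
  apply Bool.eq_iff_iff.mpr
  simp only [List.all_map, List.all_eq_true, List.mem_range, Function.comp,
    Bool.not_eq_eq_eq_not, Bool.not_true, beq_eq_false_iff_ne,
    ne_eq, decide_eq_false_iff_not, not_exists, not_and, Nat.zero_add]
  constructor
  · intro hall j hj _ hEq
    exact hall j hj ((key j hj).mpr hEq)
  · intro hall j hj hEq
    exact hall j hj (by omega) ((key j hj).mp hEq)

lemma bool_shuffle (a b c : Bool) : (b && (a && c)) = ((a && b) && c) := by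
  cases a <;> cases b <;> cases c <;> rfl

-- the stack invariant: runBF with enough fuel computes the conjunction of A's answers
-- on the ranges still on the stack
lemma runBF_eq (cs : List Char) : ∀ (k : Nat) (st : List (Nat × Nat)),
    (∀ r ∈ st, r.2 ≤ cs.length) →
    2 * (st.map fun r => r.2 - r.1).sum + st.length ≤ k →
    runBF cs k st = st.all (fun r => solveA1 ((cs.drop r.1).take (r.2 - r.1))) := by
  intro k
  induction k with
  | zero =>
    intro st hw hk
    match st with
    | [] => rfl
    | _ :: _ => simp at hk
  | succ k ih =>
    intro st hw hk
    match st with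
    | [] => rfl
    | (lo, hi) :: rest =>
      rw [runBF]
      simp only [List.map_cons, List.sum_cons, List.length_cons] at hk
      by_cases hle : hi - lo ≤ 1
      · rw [if_pos hle, ih rest (fun r hr => hw r (List.mem_cons_of_mem _ hr)) (by omega)]
        have h1 : ((cs.drop lo).take (hi - lo)).length ≤ 1 := by
          simp [List.length_take]; omega
        simp [List.all_cons, solveA1_short _ h1]
      · rw [if_neg hle]
        have hhi : hi ≤ cs.length := hw (lo, hi) List.mem_cons_self
        have hm : 2 ≤ hi - lo := by omega
        have hsl : ((cs.drop lo).take (hi - lo)).length = hi - lo := by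
          simp [List.length_take]; omega
        by_cases hscan : solveScanB cs lo hi 0 ((hi - lo) / 2) = true
        · rw [if_pos hscan]
          have hA : solveA1 ((cs.drop lo).take (hi - lo)) = false := by
            rw [solveA1_long _ (by rw [hsl]; omega), hsl,
              scanA_eq_not_scanB cs lo hi hhi hm, hscan]
            simp
          simp [List.all_cons, hA]
        · rw [if_neg hscan]
          have hscan' : solveScanB cs lo hi 0 ((hi - lo) / 2) = false := by
            simpa using hscan
          have hw' : ∀ r ∈ ((lo + (hi - lo) / 2 + 1, hi) :: (lo, lo + (hi - lo) / 2) :: rest),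
              r.2 ≤ cs.length := by
            rintro ⟨a, b⟩ hr
            rcases List.mem_cons.mp hr with heq | hr
            · cases heq; exact hhi
            rcases List.mem_cons.mp hr with heq | hr
            · cases heq; omega
            · exact hw _ (List.mem_cons_of_mem _ hr)
          rw [ih _ hw' (by simp only [List.map_cons, List.sum_cons, List.length_cons]; omega)]
          have e1 : ((cs.drop lo).take (hi - lo)).take ((hi - lo) / 2)
              = (cs.drop lo).take ((lo + (hi - lo) / 2) - lo) := by
            rw [List.take_take]
            congr 1
            omega
          have e2 : ((cs.drop lo).take (hi - lo)).drop ((hi - lo) / 2 + 1)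
              = (cs.drop (lo + (hi - lo) / 2 + 1)).take (hi - (lo + (hi - lo) / 2 + 1)) := by
            rw [List.drop_take, List.drop_drop]
            congr 1
            omega
          have hA : solveA1 ((cs.drop lo).take (hi - lo))
              = (solveA1 ((cs.drop lo).take ((lo + (hi - lo) / 2) - lo))
                  && solveA1 ((cs.drop (lo + (hi - lo) / 2 + 1)).take (hi - (lo + (hi - lo) / 2 + 1)))) := by
            rw [solveA1_long _ (by rw [hsl]; omega), hsl,
              scanA_eq_not_scanB cs lo hi hhi hm, hscan', e1, e2]
            simp
          simp only [List.all_cons, hA]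
          exact bool_shuffle _ _ _

-- ===== VERDICT (by name: the statement is the Claim_ definition above) =====
theorem solve_spec : Claim_equal_solve := by
  intro case _
  unfold Spec_solve solve solve_alt
  rw [runBF_eq _ _ _ (by simp) (by simp)]
  simp [solveA1, List.take_of_length_le]
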